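-- pv_equiv track=rewrite | github.com/frgsimpson/kitt | kitt/data/kernels.py | get_product_kernels
-- ===== SOURCE A (Python) =====
-- from enum import Enum, unique
-- from itertools import combinations_with_replacement
-- from typing import List, Sequence
--
-- @unique
-- class KernelType(Enum):
--     """
--     A collection of kernel types we wish to identify.
--     """
--
--     NOISE = 1
--     LINEAR = 2
--     RBF = 3
--     MATERN12 = 4
--     MATERN32 = 5
--     MATERN52 = 6
--     PERIODIC = 7
--     COSINE = 8
--
-- def get_kernel_names() -> List[str]:
--     """ Collect a list of valid kernel names. """
--
--     return [e.name for e in KernelType]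
--
-- def get_product_kernels(max_terms: int, primitive_kernels=None) -> List[str]:
--     """Collect a list of valid kernel names, including products of primitive kernels.
--     Product terms are restricted to a single permutation to avoid duplicates (A*B but not B*A)."""
--
--     if primitive_kernels is None:
--         primitive_kernels = get_kernel_names()
--         primitive_kernels.remove("NOISE")  # Noise is not valid in a product with stationary kernels
--
--     product_kernels = []
--     for i in range(max_terms):
--         for combination in combinations_with_replacement(primitive_kernels, i + 1):
--             kernel = "*".join(combination)
--             product_kernels.append(kernel)
--
--     # Add valid noise kernels manually
--     product_kernels.append("NOISE")
--     if max_terms > 1: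
--         product_kernels.append("LINEAR*NOISE")
--
--     return product_kernels
-- ===== SOURCE B (Python) =====
-- from enum import Enum, unique
-- from typing import List
--
-- @unique
-- class KernelType(Enum):
--     NOISE = 1
--     LINEAR = 2
--     RBF = 3
--     MATERN12 = 4
--     MATERN32 = 5
--     MATERN52 = 6
--     PERIODIC = 7
--     COSINE = 8
--
-- def get_kernel_names() -> List[str]:
--     return [e.name for e in KernelType]
--
-- def get_product_kernels(max_terms: int, primitive_kernels=None) -> List[str]:
--     """Same result as the itertools version, built incrementally: each level of
--     product strings is extended in place with every primitive whose index is >=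
--     the last index used, which reproduces combinations_with_replacement order."""
--     if primitive_kernels is None:
--         primitive_kernels = get_kernel_names()
--         primitive_kernels.remove("NOISE")
--
--     out = []
--     level = list(enumerate(primitive_kernels))  # (last primitive index, joined string)
--     for _ in range(max_terms):
--         out.extend(s for _, s in level)
--         level = [(j, s + "*" + primitive_kernels[j])
--                  for i, s in level
--                  for j in range(i, len(primitive_kernels))]
--
--     out.append("NOISE")
--     if max_terms > 1:
--         out.append("LINEAR*NOISE")
--     return out
-- ===== Notes on version B (the rewrite author's own statement) =====
-- stated objective: alternative
-- what changed: Replaces the per-length calls to itertools.combinations_with_replacement with a single incremental level expansion: each (last-index, joined-string) pair is extended in place by every primitive with index >= its last index, emitting each level as it is built.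
import Mathlib
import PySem

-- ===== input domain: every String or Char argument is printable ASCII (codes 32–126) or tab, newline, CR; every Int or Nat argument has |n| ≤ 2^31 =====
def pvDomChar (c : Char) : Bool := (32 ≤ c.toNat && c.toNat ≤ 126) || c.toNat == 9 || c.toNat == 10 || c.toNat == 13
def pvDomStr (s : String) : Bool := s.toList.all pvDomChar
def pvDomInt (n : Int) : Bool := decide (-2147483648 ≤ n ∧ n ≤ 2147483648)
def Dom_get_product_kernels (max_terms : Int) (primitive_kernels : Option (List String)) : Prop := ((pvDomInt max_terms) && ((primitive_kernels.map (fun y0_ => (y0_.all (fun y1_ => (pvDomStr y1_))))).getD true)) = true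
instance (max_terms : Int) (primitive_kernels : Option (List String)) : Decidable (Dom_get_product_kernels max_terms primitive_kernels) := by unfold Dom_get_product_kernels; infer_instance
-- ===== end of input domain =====

-- B replaces the per-length restarts of itertools.combinations_with_replacement by one
-- incremental level expansion (extend each combination with every primitive of index ≥ its
-- last index); same return value, alternative decomposition.

-- ===== PORT A =====
-- [e.name for e in KernelType]
def get_kernel_names : List String :=
  ["NOISE", "LINEAR", "RBF", "MATERN12", "MATERN32", "MATERN52", "PERIODIC", "COSINE"]

-- itertools.combinations_with_replacement(pool, r): tuples in itertools' lexicographic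
-- (by position) order; exact structural model, ported by hand.
def cwr : List String → Nat → List (List String)
  | _, 0 => [[]]
  | [], _ + 1 => []
  | x :: xs, r + 1 => (cwr (x :: xs) r).map (fun c => x :: c) ++ cwr xs (r + 1)
  termination_by pool r => (r, pool.length)

def get_product_kernels (max_terms : Int) (primitive_kernels : Option (List String)) : List String :=
  let pks := match primitive_kernels with
    | some l => l
    | none => (PySem.List.remove? get_kernel_names "NOISE").getD []  -- "NOISE" is in the literal list, so remove? never fails
  let product_kernels := (PySem.List.pyRange 0 max_terms).foldl
      (fun acc i => (cwr pks (i + 1).toNat).foldl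
          (fun acc2 c => acc2 ++ [PySem.Str.join "*" c]) acc) []
  let product_kernels := product_kernels ++ ["NOISE"]
  if max_terms > 1 then product_kernels ++ ["LINEAR*NOISE"] else product_kernels

-- ===== PORT B =====
-- one level-expansion step: extend every (last index, joined string) pair by each j ≥ last index
def gpkStep (pks : List String) (level : List (Int × String)) : List (Int × String) :=
  level.flatMap (fun p =>
    (PySem.List.pyRange p.1 (pks.length : Int)).map
      (fun j => (j, p.2 ++ "*" ++ PySem.List.pyGetD pks j "")))

-- the 'for _ in range(max_terms)' loop: emit the level, then expand it
def gpkLoop (pks : List String) : Nat → List (Int × String) → List String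
  | 0, _ => []
  | r + 1, level => level.map Prod.snd ++ gpkLoop pks r (gpkStep pks level)

def get_product_kernels_alt (max_terms : Int) (primitive_kernels : Option (List String)) : List String :=
  let pks := match primitive_kernels with
    | some l => l
    | none => (PySem.List.remove? get_kernel_names "NOISE").getD []
  let out := gpkLoop pks max_terms.toNat (PySem.List.enumerate pks)
  let out := out ++ ["NOISE"]
  if max_terms > 1 then out ++ ["LINEAR*NOISE"] else out

-- ===== PRECONDITION & SPEC =====
def Spec_get_product_kernels (max_terms : Int) (primitive_kernels : Option (List String)) (out : List String) : Prop := out = get_product_kernels_alt max_terms primitive_kernels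
instance (max_terms : Int) (primitive_kernels : Option (List String)) (out : List String) : Decidable (Spec_get_product_kernels max_terms primitive_kernels out) := by unfold Spec_get_product_kernels; infer_instance

-- ===== CLAIM (what is proved, stated in full; the proofs are below) =====
def Claim_equal_get_product_kernels : Prop := ∀ (max_terms : Int) (primitive_kernels : Option (List String)), Dom_get_product_kernels max_terms primitive_kernels → Spec_get_product_kernels max_terms primitive_kernels (get_product_kernels max_terms primitive_kernels)

-- ===== LEMMAS AND PROOFS =====

theorem strJoin_singleton (s : String) : PySem.Str.join "*" [s] = s := by
  apply String.toList_inj.mp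
  simp [PySem.Str.toList_join, PySem.Chars.join_singleton]

theorem charsJoin_shift (r : List (List Char)) (sep p q : List Char) :
    PySem.Chars.join sep ((p ++ sep ++ q) :: r) = p ++ sep ++ PySem.Chars.join sep (q :: r) := by
  cases r with
  | nil => simp [PySem.Chars.join_singleton]
  | cons a r => rw [PySem.Chars.join_cons_cons, PySem.Chars.join_cons_cons]; simp

theorem strJoin_shift (s b : String) (c : List String) :
    PySem.Str.join "*" ((s ++ "*" ++ b) :: c) = PySem.Str.join "*" (s :: b :: c) := by
  apply String.toList_inj.mp
  rw [PySem.Str.toList_join, PySem.Str.toList_join]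
  simp only [List.map_cons, String.toList_append]
  rw [charsJoin_shift]
  cases c with
  | nil => rw [PySem.Chars.join_cons_cons]
  | cons a c => rw [PySem.Chars.join_cons_cons "*".toList s.toList]

theorem gpkStep_append (pks : List String) (l1 l2 : List (Int × String)) :
    gpkStep pks (l1 ++ l2) = gpkStep pks l1 ++ gpkStep pks l2 := by
  simp [gpkStep]

theorem stepIt_append (pks : List String) (t : Nat) (l1 l2 : List (Int × String)) :
    (gpkStep pks)^[t] (l1 ++ l2) = (gpkStep pks)^[t] l1 ++ (gpkStep pks)^[t] l2 := by
  induction t generalizing l1 l2 with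
  | zero => simp
  | succ t ih => simp only [Function.iterate_succ_apply, gpkStep_append, ih]

theorem stepIt_flatMap (pks : List String) (t : Nat) (L : List (Int × String)) :
    (gpkStep pks)^[t] L = L.flatMap (fun p => (gpkStep pks)^[t] [p]) := by
  induction L with
  | nil => induction t with
    | zero => simp
    | succ t ih => simp only [Function.iterate_succ_apply, gpkStep, List.flatMap_nil, ih]
  | cons p L ih =>
      have : p :: L = [p] ++ L := rfl
      rw [this, stepIt_append, List.flatMap_append, ← ih, List.flatMap_cons, List.flatMap_nil,
        List.append_nil]

theorem cwr_drop_aux (pks : List String) (t : Nat) :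
    ∀ (d k : Nat), pks.length - k ≤ d →
      cwr (pks.drop k) (t + 1)
        = (PySem.List.pyRange (k : Int) (pks.length : Int)).flatMap
            (fun j => (cwr (pks.drop j.toNat) t).map (fun c => PySem.List.pyGetD pks j "" :: c)) := by
  intro d
  induction d with
  | zero =>
      intro k h
      have hk : pks.length ≤ k := by omega
      rw [List.drop_eq_nil_of_le hk, PySem.List.pyRange_one_eq_nil (by exact_mod_cast hk)]
      simp [cwr]
  | succ d ih =>
      intro k h
      by_cases hk : k < pks.length
      · rw [PySem.List.pyRange_one_cons (by exact_mod_cast hk), List.flatMap_cons]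
        have hd : pks.drop k = pks[k] :: pks.drop (k + 1) := (List.getElem_cons_drop hk).symm
        have hget : PySem.List.pyGetD pks (k : Int) "" = pks[k] := by
          rw [PySem.List.pyGetD_natCast, List.getD_eq_getElem pks "" hk]
        rw [hd]
        conv_lhs => rw [cwr]
        rw [ih (k + 1) (by omega)]
        rw [Int.toNat_natCast, hget, ← hd]
        norm_num
      · have hk' : pks.length ≤ k := by omega
        rw [List.drop_eq_nil_of_le hk', PySem.List.pyRange_one_eq_nil (by exact_mod_cast hk')]
        simp [cwr]

theorem cwr_drop (pks : List String) (t k : Nat) :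
    cwr (pks.drop k) (t + 1)
      = (PySem.List.pyRange (k : Int) (pks.length : Int)).flatMap
          (fun j => (cwr (pks.drop j.toNat) t).map (fun c => PySem.List.pyGetD pks j "" :: c)) :=
  cwr_drop_aux pks t pks.length k (by omega)

theorem stepIt_singleton (pks : List String) :
    ∀ (t : Nat) (i : Int) (s : String), 0 ≤ i →
      ((gpkStep pks)^[t] [(i, s)]).map Prod.snd
        = (cwr (pks.drop i.toNat) t).map (fun c => PySem.Str.join "*" (s :: c)) := by
  intro t
  induction t with
  | zero =>
      intro i s _
      simp [cwr, strJoin_singleton]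
  | succ t ih =>
      intro i s hi
      rw [Function.iterate_succ_apply]
      have hstep : gpkStep pks [(i, s)]
          = (PySem.List.pyRange i (pks.length : Int)).map
              (fun j => (j, s ++ "*" ++ PySem.List.pyGetD pks j "")) := by
        simp [gpkStep]
      rw [hstep, stepIt_flatMap, List.map_flatMap, List.flatMap_map]
      have hiℕ : ((i.toNat : Int)) = i := Int.toNat_of_nonneg hi
      conv_rhs => rw [cwr_drop pks t i.toNat, hiℕ]
      rw [List.map_flatMap]
      apply List.flatMap_congr
      intro j hj
      have hij : i ≤ j := (PySem.List.mem_pyRange_one.mp hj).1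
      rw [ih j (s ++ "*" ++ PySem.List.pyGetD pks j "") (by omega)]
      rw [List.map_map]
      apply List.map_congr_left
      intro c _
      simp only [Function.comp_apply]
      rw [strJoin_shift]

theorem roundEq (pks : List String) (t : Nat) :
    ((gpkStep pks)^[t] (PySem.List.enumerate pks)).map Prod.snd
      = (cwr pks (t + 1)).map (PySem.Str.join "*") := by
  rw [PySem.List.enumerate_eq_map_pyRange pks ""]
  rw [stepIt_flatMap, List.map_flatMap, List.flatMap_map]
  have h0 : pks = pks.drop 0 := rfl
  conv_rhs => rw [h0, cwr_drop pks t 0, List.map_flatMap]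
  have hlen : PySem.List.len pks = (pks.length : Int) := by simp [PySem.List.len]
  rw [hlen]
  apply List.flatMap_congr
  intro j hj
  have hj0 : (0 : Int) ≤ j := (PySem.List.mem_pyRange_one.mp hj).1
  rw [stepIt_singleton pks t j (PySem.List.pyGetD pks j "") hj0, List.map_map]
  rfl

theorem gpkLoop_eq (pks : List String) :
    ∀ (m : Nat) (L : List (Int × String)),
      gpkLoop pks m L = (List.range m).flatMap (fun t => ((gpkStep pks)^[t] L).map Prod.snd) := by
  intro m
  induction m with
  | zero => intro L; simp [gpkLoop]
  | succ m ih =>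
      intro L
      rw [List.range_succ_eq_map, List.flatMap_cons, List.flatMap_map]
      show gpkLoop pks (m + 1) L = L.map Prod.snd ++ _
      rw [show gpkLoop pks (m + 1) L = L.map Prod.snd ++ gpkLoop pks m (gpkStep pks L) from rfl,
        ih (gpkStep pks L)]
      congr 1

theorem afold (pks : List String) :
    ∀ (m : Nat),
      (PySem.List.pyRange 0 (m : Int)).foldl
          (fun acc i => (cwr pks (i + 1).toNat).foldl
              (fun acc2 c => acc2 ++ [PySem.Str.join "*" c]) acc) []
        = (List.range m).flatMap (fun t => (cwr pks (t + 1)).map (PySem.Str.join "*")) := by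
  intro m
  induction m with
  | zero => rw [PySem.List.pyRange_one_eq_nil (by omega)]; simp
  | succ m ih =>
      have hc : ((m + 1 : Nat) : Int) = (m : Int) + 1 := by push_cast; ring
      rw [hc, PySem.List.pyRange_one_succ_right (by omega), List.foldl_append, ih,
        List.range_succ, List.flatMap_append]
      simp only [List.foldl_cons, List.foldl_nil]
      rw [PySem.List.foldl_append_singleton_eq_map]
      have : ((m : Int) + 1).toNat = m + 1 := by omega
      rw [this]
      simp

theorem coreEq (pks : List String) (m : Int) :
    (PySem.List.pyRange 0 m).foldl
        (fun acc i => (cwr pks (i + 1).toNat).foldl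
            (fun acc2 c => acc2 ++ [PySem.Str.join "*" c]) acc) []
      = gpkLoop pks m.toNat (PySem.List.enumerate pks) := by
  by_cases hm : m ≤ 0
  · rw [PySem.List.pyRange_one_eq_nil hm, show m.toNat = 0 by omega]
    rfl
  · have h : m = (m.toNat : Int) := (Int.toNat_of_nonneg (by omega)).symm
    rw [h, afold pks m.toNat, Int.toNat_natCast, gpkLoop_eq pks m.toNat]
    apply List.flatMap_congr
    intro t _
    rw [roundEq]

-- ===== VERDICT (by name: the statement is the Claim_ definition above) =====
theorem get_product_kernels_spec : Claim_equal_get_product_kernels := by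
  intro m pk _
  unfold Spec_get_product_kernels get_product_kernels get_product_kernels_alt
  cases pk with
  | none => simp only; rw [coreEq]
  | some l => simp only; rw [coreEq]
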